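-- pv_equiv track=rewrite | github.com/subedi04/300-Python-Exercises | 02_Intermediate/Problem_118/assignment_118.py | find_lowest_sublists
-- ===== SOURCE A (Python) =====
-- def find_lowest_sublists(nested_list):
--     lowest_number = float('inf')  # Initialize with positive infinity
--     lowest_sublists = []
--
--     # Find the lowest number in the nested list
--     for sublist in nested_list:
--         for number in sublist:
--             if number < lowest_number:
--                 lowest_number = number
--
--     # Find the sublists that contain the lowest number
--     for sublist in nested_list:
--         if lowest_number in sublist:
--             lowest_sublists.append(sublist)
--
--     return lowest_sublists
-- ===== SOURCE B (Python) =====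
-- def find_lowest_sublists(nested_list):
--     # Single pass: keep the best (lowest) per-sublist minimum seen so far and the
--     # sublists achieving it; a strictly smaller minimum resets the collection.
--     best = None
--     result = []
--     for sub in nested_list:
--         if not sub:
--             continue
--         m = min(sub)
--         if best is None or m < best:
--             best, result = m, [sub]
--         elif m == best:
--             result.append(sub)
--     return result
-- ===== Notes on version B (the rewrite author's own statement) =====
-- stated objective: alternative
-- what changed: B is a single pass with a reset accumulator: it tracks the lowest per-sublist minimum seen so far and the list of sublists achieving it (resetting the collection when a strictly smaller minimum appears), instead of A's two staged passes (global-min scan, then a membership re-scan of every sublist).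
import Mathlib
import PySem

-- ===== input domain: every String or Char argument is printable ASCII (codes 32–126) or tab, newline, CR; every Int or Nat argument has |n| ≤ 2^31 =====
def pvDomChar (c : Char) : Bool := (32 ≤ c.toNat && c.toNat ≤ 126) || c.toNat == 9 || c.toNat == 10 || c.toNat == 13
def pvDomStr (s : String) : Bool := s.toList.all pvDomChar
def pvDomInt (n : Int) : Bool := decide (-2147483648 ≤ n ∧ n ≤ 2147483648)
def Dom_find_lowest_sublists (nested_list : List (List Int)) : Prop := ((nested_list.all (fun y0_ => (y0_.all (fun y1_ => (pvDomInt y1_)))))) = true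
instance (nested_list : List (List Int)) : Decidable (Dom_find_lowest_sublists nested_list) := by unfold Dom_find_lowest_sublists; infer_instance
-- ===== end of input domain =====

-- B replaces A's two staged passes (global-min scan, then a membership re-scan of every
-- sublist) by ONE pass with a reset accumulator: it tracks the lowest per-sublist minimum
-- seen so far together with the sublists achieving it; alternative decomposition, same cost.

-- ===== PORT A =====
-- `Option Int` models A's `lowest_number`: `none` is the initial float('inf'), below which
-- every int lies, so `number < lowest_number` is `true` when the accumulator is `none`.
def find_lowest_sublists (nested_list : List (List Int)) : List (List Int) :=
  let lowest : Option Int :=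
    nested_list.foldl
      (fun acc sublist =>
        sublist.foldl
          (fun low number =>
            match low with
            | none => some number                                  -- number < inf
            | some m => if number < m then some number else some m)
          acc)
      none
  nested_list.foldl
    (fun res sublist =>
      if (match lowest with
          | none => false                                          -- inf is in no int list
          | some m => sublist.contains m) then res ++ [sublist] else res)
    []

-- ===== PORT B =====
-- Python's min() on a NONEMPTY list (B only calls min on non-empty sublists).
def pymin_fls (s : List Int) : Int :=
  match s with
  | [] => 0          -- unreachable: B calls min only on non-empty lists
  | x :: t => t.foldl min x

-- one step of B's single pass: state = (best minimum so far, sublists achieving it)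
def flsStep (st : Option Int × List (List Int)) (sub : List Int) :
    Option Int × List (List Int) :=
  if sub.isEmpty then st
  else
    let m := pymin_fls sub
    match st.1 with
    | none => (some m, [sub])
    | some b =>
      if m < b then (some m, [sub])
      else if m == b then (st.1, st.2 ++ [sub])
      else st

def find_lowest_sublists_alt (nested_list : List (List Int)) : List (List Int) :=
  (nested_list.foldl flsStep (none, [])).2

-- ===== PRECONDITION & SPEC =====
def Spec_find_lowest_sublists (nested_list : List (List Int)) (out : List (List Int)) : Prop := out = find_lowest_sublists_alt nested_list
instance (nested_list : List (List Int)) (out : List (List Int)) : Decidable (Spec_find_lowest_sublists nested_list out) := by unfold Spec_find_lowest_sublists; infer_instance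

-- ===== CLAIM (what is proved, stated in full; the proofs are below) =====
def Claim_equal_find_lowest_sublists : Prop := ∀ (nested_list : List (List Int)), Dom_find_lowest_sublists nested_list → Spec_find_lowest_sublists nested_list (find_lowest_sublists nested_list)

-- ===== LEMMAS AND PROOFS =====

-- the common characterisation both ports are reduced to
def flsSpec (nl : List (List Int)) : List (List Int) :=
  match nl.flatten.min? with
  | none => []
  | some g => nl.filter (fun s => s.contains g)

-- A's inner min step.
def ominStep (low : Option Int) (number : Int) : Option Int :=
  match low with
  | none => some number
  | some m => if number < m then some number else some m

theorem ominStep_some (m n : Int) : ominStep (some m) n = some (min m n) := by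
  show (if n < m then some n else some m) = some (min m n)
  rw [min_def]
  split_ifs <;> simp only [Option.some.injEq] <;> omega

theorem foldl_ominStep_some (l : List Int) (a : Int) :
    l.foldl ominStep (some a) = some (l.foldl min a) := by
  induction l generalizing a with
  | nil => rfl
  | cons x t ih => simp [List.foldl_cons, ominStep_some, ih]

theorem foldl_ominStep_none (l : List Int) : l.foldl ominStep none = l.min? := by
  cases l with
  | nil => rfl
  | cons x t =>
    rw [List.min?_cons']
    simp [List.foldl_cons, ominStep, foldl_ominStep_some]

theorem nested_fold_eq_flatten (nl : List (List Int)) (acc : Option Int) :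
    nl.foldl (fun acc sub => sub.foldl ominStep acc) acc
      = nl.flatten.foldl ominStep acc := by
  induction nl generalizing acc with
  | nil => rfl
  | cons s t ih => simp [List.foldl_cons, List.flatten_cons, List.foldl_append, ih]

theorem foldl_append_if_filter (nl : List (List Int)) (c : List Int → Bool)
    (acc : List (List Int)) :
    nl.foldl (fun res sub => if c sub then res ++ [sub] else res) acc
      = acc ++ nl.filter c := by
  induction nl generalizing acc with
  | nil => simp
  | cons s t ih =>
    by_cases h : c s <;> simp [List.foldl_cons, h, ih]

theorem min?_eq_pymin (s : List Int) (hs : s ≠ []) : s.min? = some (pymin_fls s) := by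
  cases s with
  | nil => exact absurd rfl hs
  | cons x t => rw [List.min?_cons']; rfl

theorem pymin_mem (s : List Int) (hs : s ≠ []) :
    pymin_fls s ∈ s ∧ ∀ x ∈ s, pymin_fls s ≤ x :=
  List.min?_eq_some_iff.mp (min?_eq_pymin s hs)

-- A equals the characterisation
theorem A_eq_spec (nl : List (List Int)) : find_lowest_sublists nl = flsSpec nl := by
  unfold find_lowest_sublists flsSpec
  simp only
  rw [show (fun (acc : Option Int) (sublist : List Int) =>
        sublist.foldl (fun low number =>
          match low with
          | none => some number
          | some m => if number < m then some number else some m) acc)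
      = (fun acc sub => sub.foldl ominStep acc) from rfl]
  rw [nested_fold_eq_flatten, foldl_ominStep_none]
  rw [foldl_append_if_filter, List.nil_append]
  cases h : nl.flatten.min? with
  | none => simp
  | some g => rfl

-- if m is strictly below the minimum of nl.flatten, no sublist of nl contains m
theorem filter_contains_nil (nl : List (List Int)) (g m : Int)
    (h : nl.flatten.min? = some g) (hlt : m < g) :
    nl.filter (fun s => s.contains m) = [] := by
  rw [List.filter_eq_nil_iff]
  intro s hs
  simp only [List.contains_iff_mem]
  intro hm
  have := (List.min?_eq_some_iff.mp h).2 m (List.mem_flatten.mpr ⟨s, hs, hm⟩)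
  omega

-- unfolding equation for flsSpec
theorem flsSpec_some (nl : List (List Int)) (g : Int) (h : nl.flatten.min? = some g) :
    flsSpec nl = nl.filter (fun s => s.contains g) := by
  unfold flsSpec; rw [h]

-- B's single pass computes (min of flatten, characterisation)
theorem B_invariant (nl : List (List Int)) :
    nl.foldl flsStep (none, []) = (nl.flatten.min?, flsSpec nl) := by
  induction nl using List.reverseRecOn with
  | nil => rfl
  | append_singleton l s ih =>
    rw [List.foldl_append, ih, List.foldl_cons, List.foldl_nil]
    have hflat : (l ++ [s]).flatten = l.flatten ++ s := by simp
    by_cases hse : s = []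
    · subst hse
      have h1 : (l ++ [([] : List Int)]).flatten.min? = l.flatten.min? := by
        rw [hflat]; simp
      have h2 : flsSpec (l ++ [([] : List Int)]) = flsSpec l := by
        unfold flsSpec
        rw [h1]
        cases l.flatten.min? with
        | none => rfl
        | some g => simp [List.filter_append]
      rw [h1, h2]
      simp [flsStep]
    · have hmin := min?_eq_pymin s hse
      obtain ⟨hmem, hle⟩ := pymin_mem s hse
      have hsne : s.isEmpty = false := by simpa using hse
      cases hl : l.flatten.min? with
      | none =>
        have hnil : l.flatten = [] := List.min?_eq_none_iff.mp hl
        have hfmin : (l ++ [s]).flatten.min? = some (pymin_fls s) := by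
          rw [hflat, hnil, List.nil_append, hmin]
        have hfl : l.filter (fun t => t.contains (pymin_fls s)) = [] := by
          rw [List.filter_eq_nil_iff]
          intro t ht
          have ht0 : t = [] := List.eq_nil_iff_forall_not_mem.mpr (fun x hx =>
            (List.eq_nil_iff_forall_not_mem.mp hnil x)
              (List.mem_flatten.mpr ⟨t, ht, hx⟩))
          simp [ht0]
        have hspec : flsSpec (l ++ [s]) = [s] := by
          rw [flsSpec_some _ _ hfmin, List.filter_append, hfl, List.nil_append]
          simp [hmem]
        rw [hfmin, hspec]
        simp [flsStep, hsne]
      | some b =>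
        obtain ⟨hbmem, hble⟩ := List.min?_eq_some_iff.mp hl
        have hflatmin : (l ++ [s]).flatten.min? = some (min b (pymin_fls s)) := by
          apply List.min?_eq_some_iff.mpr
          constructor
          · rcases le_total b (pymin_fls s) with hc | hc
            · rw [min_eq_left hc, hflat]
              exact List.mem_append.mpr (Or.inl hbmem)
            · rw [min_eq_right hc, hflat]
              exact List.mem_append.mpr (Or.inr hmem)
          · intro x hx
            rw [hflat] at hx
            rcases List.mem_append.mp hx with hx | hx
            · exact le_trans (min_le_left _ _) (hble x hx)
            · exact le_trans (min_le_right _ _) (hle x hx)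
        have hspec : flsSpec (l ++ [s])
            = (l.filter (fun t => t.contains (min b (pymin_fls s))))
              ++ (if s.contains (min b (pymin_fls s)) then [s] else []) := by
          rw [flsSpec_some _ _ hflatmin, List.filter_append]
          simp only [List.filter_cons, List.filter_nil]
        by_cases h1 : pymin_fls s < b
        · have hmm : min b (pymin_fls s) = pymin_fls s := min_eq_right (le_of_lt h1)
          have hout : flsSpec (l ++ [s]) = [s] := by
            rw [hspec, hmm, filter_contains_nil l b (pymin_fls s) hl h1,
              List.nil_append, if_pos (by simpa [List.contains_iff_mem] using hmem)]
          rw [hflatmin, hmm, hout]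
          simp [flsStep, hsne, h1]
        · by_cases h2 : pymin_fls s = b
          · have hmm : min b (pymin_fls s) = b := by rw [h2, min_self]
            have hout : flsSpec (l ++ [s]) = flsSpec l ++ [s] := by
              rw [hspec, hmm, ← flsSpec_some l b hl,
                if_pos (by simpa [List.contains_iff_mem, h2] using hmem)]
            rw [hflatmin, hmm, hout]
            simp [flsStep, hsne, h2]
          · have hbs : b < pymin_fls s := by
              rcases lt_trichotomy (pymin_fls s) b with h | h | h
              · exact absurd h h1
              · exact absurd h h2
              · exact h
            have hmm : min b (pymin_fls s) = b := min_eq_left (le_of_lt hbs)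
            have hb : b ∉ s := fun hb => by have := hle b hb; omega
            have hnc : s.contains b = false := by simpa using hb
            have hout : flsSpec (l ++ [s]) = flsSpec l := by
              rw [hspec, hmm, ← flsSpec_some l b hl, hnc]
              simp
            rw [hflatmin, hmm, hout]
            simp [flsStep, hsne, h1, h2]

theorem B_eq_spec (nl : List (List Int)) : find_lowest_sublists_alt nl = flsSpec nl := by
  unfold find_lowest_sublists_alt
  rw [B_invariant]

-- ===== VERDICT (by name: the statement is the Claim_ definition above) =====
theorem find_lowest_sublists_spec : Claim_equal_find_lowest_sublists := by
  intro nl _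
  unfold Spec_find_lowest_sublists
  rw [A_eq_spec, B_eq_spec]
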